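-- pv_equiv track=rewrite | github.com/guanhaowu/Project-bordspel | Beta/init_settings.py | getTextSize
-- ===== SOURCE A (Python) =====
-- def getTextSize(num):
--     # font size
--     if num == 0:
--         textsize0 = 30
--         return textsize0
--
--     if num == 1:
--         textsize1 = 24
--         return textsize1
--
--     if num == 2:
--         textsize2 = getTextSize(1)-2
--         return textsize2
--
--     if num == 3:
--         textsize3 = getTextSize(2)-4
--         return textsize3
-- ===== SOURCE B (Python) =====
-- def getTextSize(num):
--     # font size: direct lookup table instead of the recursive if-chain
--     sizes = {0: 30, 1: 24, 2: 22, 3: 18}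
--     return sizes.get(num)
-- ===== Notes on version B (the rewrite author's own statement) =====
-- stated objective: simpler
-- what changed: Replaces the recursive if-chain (which derives 22 and 18 by recursive subtraction) with a precomputed constant dict and a single .get lookup, returning None by default out of range.
import Mathlib
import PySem

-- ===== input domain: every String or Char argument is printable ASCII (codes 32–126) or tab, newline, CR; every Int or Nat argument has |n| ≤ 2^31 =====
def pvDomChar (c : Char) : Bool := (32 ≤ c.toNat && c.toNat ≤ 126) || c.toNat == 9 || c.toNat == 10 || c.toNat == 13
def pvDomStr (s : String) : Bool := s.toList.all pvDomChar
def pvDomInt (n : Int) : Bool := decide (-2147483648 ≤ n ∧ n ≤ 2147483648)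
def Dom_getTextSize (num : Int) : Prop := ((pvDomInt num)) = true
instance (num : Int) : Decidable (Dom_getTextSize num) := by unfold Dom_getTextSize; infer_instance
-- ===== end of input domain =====

-- ===== PORT A =====
-- B replaces A's recursive if-chain with a constant lookup table (objective: simpler).
def getTextSize (num : Int) : Option Int :=
  if _h0 : num = 0 then some 30
  else if _h1 : num = 1 then some 24
  else if _h2 : num = 2 then
    match getTextSize 1 with
    | some v => some (v - 2)
    | none => none
  else if _h3 : num = 3 then
    match getTextSize 2 with
    | some v => some (v - 4)
    | none => none
  else none
termination_by num.toNat
decreasing_by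
  all_goals (simp_all; try omega)

-- ===== PORT B =====
def getTextSize_alt (num : Int) : Option Int :=
  (PySem.Dict.ofList [((0 : Int), (30 : Int)), (1, 24), (2, 22), (3, 18)]).get? num

-- ===== PRECONDITION & SPEC =====
def Spec_getTextSize (num : Int) (out : Option Int) : Prop := out = getTextSize_alt num
instance (num : Int) (out : Option Int) : Decidable (Spec_getTextSize num out) := by unfold Spec_getTextSize; infer_instance

-- ===== CLAIM (what is proved, stated in full; the proofs are below) =====
def Claim_equal_getTextSize : Prop := ∀ (num : Int), Dom_getTextSize num → Spec_getTextSize num (getTextSize num)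

-- ===== LEMMAS AND PROOFS =====

-- ===== VERDICT (by name: the statement is the Claim_ definition above) =====
theorem getTextSize_spec : Claim_equal_getTextSize := by
  intro num _hd
  unfold Spec_getTextSize
  by_cases h0 : num = 0
  · subst h0
    simp [getTextSize, getTextSize_alt, PySem.Dict.ofList, PySem.Dict.update,
          PySem.Dict.insert, PySem.Dict.get?, PySem.Dict.empty]
  by_cases h1 : num = 1
  · subst h1
    simp [getTextSize, getTextSize_alt, PySem.Dict.ofList, PySem.Dict.update,
          PySem.Dict.insert, PySem.Dict.get?, PySem.Dict.empty]
  by_cases h2 : num = 2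
  · subst h2
    simp [getTextSize, getTextSize_alt, PySem.Dict.ofList, PySem.Dict.update,
          PySem.Dict.insert, PySem.Dict.get?, PySem.Dict.empty]
  by_cases h3 : num = 3
  · subst h3
    simp [getTextSize, getTextSize_alt, PySem.Dict.ofList, PySem.Dict.update,
          PySem.Dict.insert, PySem.Dict.get?, PySem.Dict.empty]
  rw [getTextSize, getTextSize_alt]
  simp [h0, h1, h2, h3, PySem.Dict.ofList, PySem.Dict.update, PySem.Dict.insert,
        PySem.Dict.get?, PySem.Dict.empty]
  omega
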